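-- pv_equiv track=rewrite | github.com/FarzanaEva/Data-Structure-and-Algorithm-Practice | InterviewBit Problems/Two Pointers/pair_with_given_difference.py | solve
-- ===== SOURCE A (Python) =====
-- def solve(A, B):
--     diff_dict = {}
--
--     for i in range(len(A)):
--         if A[i] in diff_dict: return 1
--         else:
--             diff_dict[A[i]+B] = A[i]
--             diff_dict[A[i]-B] = A[i]
--
--     return 0
-- ===== SOURCE B (Python) =====
-- def solve(A, B):
--     for j in range(len(A)):
--         for i in range(j):
--             if abs(A[j] - A[i]) == abs(B):
--                 return 1
--     return 0
-- ===== Notes on version B (the rewrite author's own statement) =====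
-- stated objective: simpler
-- what changed: B drops A's auxiliary dict of pre-stored target keys entirely and does a direct brute-force scan over all index pairs i<j, testing abs(A[j]-A[i]) == abs(B); O(n^2) instead of O(n) but with no auxiliary data structure.
import Mathlib
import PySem

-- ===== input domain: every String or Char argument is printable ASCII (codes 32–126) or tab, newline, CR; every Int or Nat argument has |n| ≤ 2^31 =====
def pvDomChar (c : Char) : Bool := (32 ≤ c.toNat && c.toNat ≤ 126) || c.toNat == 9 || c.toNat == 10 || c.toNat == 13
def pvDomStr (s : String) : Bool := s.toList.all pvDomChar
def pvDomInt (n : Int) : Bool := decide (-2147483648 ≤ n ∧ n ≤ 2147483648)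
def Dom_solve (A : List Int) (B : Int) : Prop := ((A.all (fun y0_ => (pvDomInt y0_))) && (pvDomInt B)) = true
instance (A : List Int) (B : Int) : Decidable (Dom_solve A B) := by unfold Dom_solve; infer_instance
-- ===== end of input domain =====

-- B drops A's auxiliary dict of pre-stored target keys and instead brute-force scans all
-- index pairs i < j, testing abs(A[j]-A[i]) == abs(B) (simpler: no auxiliary structure).

-- ===== PORT A =====
-- loop over the elements of A in order, carrying the dict of target keys
def solveGo (B : Int) : List Int → PySem.Dict Int Int → Int
  | [], _ => 0
  | x :: xs, d =>
    if d.contains x then 1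
    else solveGo B xs ((d.insert (x + B) x).insert (x - B) x)

def solve (A : List Int) (B : Int) : Int := solveGo B A PySem.Dict.empty

-- ===== PORT B =====
-- nested for-loops over j in range(len(A)) and i in range(j) with an early 'return 1' become
-- nested `any`; indices drawn from `range` are always in range, so `getD` is exact for A[j], A[i]
def solve_alt (A : List Int) (B : Int) : Int :=
  if (List.range A.length).any (fun j =>
      (List.range j).any (fun i => (A.getD j 0 - A.getD i 0).natAbs == B.natAbs))
  then 1 else 0

-- ===== PRECONDITION & SPEC =====
def Spec_solve (A : List Int) (B : Int) (out : Int) : Prop := out = solve_alt A B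
instance (A : List Int) (B : Int) (out : Int) : Decidable (Spec_solve A B out) := by unfold Spec_solve; infer_instance

-- ===== CLAIM (what is proved, stated in full; the proofs are below) =====
def Claim_equal_solve : Prop := ∀ (A : List Int) (B : Int), Dom_solve A B → Spec_solve A B (solve A B)

-- ===== LEMMAS AND PROOFS =====

-- proof-only model of A's pass: p is the (reversed) prefix already visited
def exB (B : Int) : List Int → List Int → Bool
  | [], _ => false
  | x :: xs, p => p.any (fun y => x == y + B || x == y - B) || exB B xs (x :: p)

theorem solveGo_eq_exB (B : Int) (xs : List Int) (p : List Int) (d : PySem.Dict Int Int)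
    (h : ∀ k, d.contains k = p.any (fun y => k == y + B || k == y - B)) :
    solveGo B xs d = if exB B xs p then 1 else 0 := by
  induction xs generalizing p d with
  | nil => rfl
  | cons x xs ih =>
    simp only [solveGo, exB, h x]
    rcases Bool.eq_false_or_eq_true (p.any fun y => x == y + B || x == y - B) with hc | hc
    · simp [hc]
    · simp only [hc]
      apply ih
      intro k
      rw [PySem.Dict.contains_insert, PySem.Dict.contains_insert, h k]
      simp only [List.any_cons]
      cases k == x - B <;> cases k == x + B <;> simp

theorem exB_iff (B : Int) (xs : List Int) (p : List Int) :
    exB B xs p = true ↔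
      ∃ j < xs.length, ∃ y, (y ∈ p ∨ y ∈ xs.take j) ∧
        (xs.getD j 0 = y + B ∨ xs.getD j 0 = y - B) := by
  induction xs generalizing p with
  | nil => simp [exB]
  | cons x xs ih =>
    simp only [exB, Bool.or_eq_true, List.any_eq_true, ih]
    constructor
    · rintro (⟨y, hy, hb⟩ | ⟨j, hj, y, hmem, heq⟩)
      · exact ⟨0, by simp, y, Or.inl hy, by
          simpa [List.getD_cons_zero, beq_iff_eq] using hb⟩
      · refine ⟨j + 1, by simp only [List.length_cons]; omega, y, ?_,
          by simpa [List.getD_cons_succ] using heq⟩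
        rcases hmem with hmem | hmem
        · rcases List.mem_cons.mp hmem with h | h
          · subst h; exact Or.inr (by simp [List.take_succ_cons])
          · exact Or.inl h
        · exact Or.inr (by simp [List.take_succ_cons, hmem])
    · rintro ⟨j, hj, y, hmem, heq⟩
      cases j with
      | zero =>
        left
        refine ⟨y, ?_, ?_⟩
        · rcases hmem with h | h
          · exact h
          · simp at h
        · simpa [List.getD_cons_zero, beq_iff_eq] using heq
      | succ j =>
        right
        refine ⟨j, by simp only [List.length_cons] at hj; omega, y, ?_,
          by simpa [List.getD_cons_succ] using heq⟩
        rcases hmem with h | h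
        · exact Or.inl (List.mem_cons_of_mem _ h)
        · simp only [List.take_succ_cons, List.mem_cons] at h
          rcases h with h | h
          · subst h; exact Or.inl (List.mem_cons_self)
          · exact Or.inr h

theorem partner_iff (k y B : Int) :
    (k = y + B ∨ k = y - B) ↔ (k - y).natAbs = B.natAbs := by omega

theorem mem_take_iff (A : List Int) (j : Nat) (hj : j < A.length) (y : Int) :
    y ∈ A.take j ↔ ∃ i < j, A.getD i 0 = y := by
  constructor
  · intro h
    obtain ⟨i, hi, he⟩ := List.getElem_of_mem h
    have hlen : i < j := by
      have := hi; simp [List.length_take] at this; omega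
    refine ⟨i, hlen, ?_⟩
    rw [List.getElem_take] at he
    rw [List.getD_eq_getElem _ _ (by omega)]
    exact he
  · rintro ⟨i, hi, he⟩
    have hiA : i < A.length := by omega
    rw [List.getD_eq_getElem _ _ hiA] at he
    subst he
    have h1 : i < (A.take j).length := by simp [List.length_take]; omega
    have h2 := List.getElem_mem h1
    rwa [List.getElem_take] at h2

theorem alt_cond_iff (A : List Int) (B : Int) :
    ((List.range A.length).any (fun j =>
      (List.range j).any (fun i => (A.getD j 0 - A.getD i 0).natAbs == B.natAbs))) = true ↔
      ∃ j < A.length, ∃ i < j, (A.getD j 0 - A.getD i 0).natAbs = B.natAbs := by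
  simp [List.any_eq_true, List.mem_range]

-- ===== VERDICT (by name: the statement is the Claim_ definition above) =====
theorem solve_spec : Claim_equal_solve := by
  intro A B _
  unfold Spec_solve solve solve_alt
  rw [solveGo_eq_exB B A [] PySem.Dict.empty
      (fun k => by simp [PySem.Dict.contains_empty])]
  have hiff : exB B A [] = ((List.range A.length).any (fun j =>
      (List.range j).any (fun i => (A.getD j 0 - A.getD i 0).natAbs == B.natAbs))) := by
    rw [Bool.eq_iff_iff, exB_iff, alt_cond_iff]
    constructor
    · rintro ⟨j, hj, y, hmem, heq⟩
      rcases hmem with h | h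
      · simp at h
      · obtain ⟨i, hi, he⟩ := (mem_take_iff A j hj y).mp h
        exact ⟨j, hj, i, hi, by subst he; exact (partner_iff _ _ _).mp heq⟩
    · rintro ⟨j, hj, i, hi, he⟩
      exact ⟨j, hj, A.getD i 0, Or.inr ((mem_take_iff A j hj _).mpr ⟨i, hi, rfl⟩),
        (partner_iff _ _ _).mpr he⟩
  rw [hiff]
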